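-- pv_equiv track=rewrite | github.com/Michal-Madarasz/scrambler | Scrambler.py | polynomialDescrambler25
-- ===== SOURCE A (Python) =====
-- from operator import xor
--
-- def arrayShift(array):
--     tmp = array[0]
--     for i in range(0, len(array) - 1):
--         array[i] = array[i + 1]
--     array[len(array) - 1] = tmp
--     return array
--
-- def polynomialDescrambler25(signal):
--     r = len(signal)
--     seed = [0,1,1,1,0,1,0,1,0,1,0,0,1,0,1,1,1,0,1,0,0,1,0,1,1]
--     output = []
--     for i in range(0, r):
--         xorA = xor(signal[i], seed[24])
--         arrayShift(seed)
--         seed[0] = signal[i]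
--         output.append(xorA)
--     return output
-- ===== SOURCE B (Python) =====
-- def polynomialDescrambler25(sig):
--     # The 25-tap register reduces to a fixed delay of two samples; the first
--     # two outputs come from the register's initial transient contents.
--     out = []
--     for i, x in enumerate(sig):
--         if i == 0:
--             out.append(x ^ 1)
--         elif i == 1:
--             out.append(x)
--         else:
--             out.append(x ^ sig[i - 2])
--     return out
-- ===== Notes on version B (the rewrite author's own statement) =====
-- stated objective: faster
-- what changed: Replaced the simulated 25-cell shift register (rotated element-by-element each step) by the closed-form delay line it implements: out[i] = signal[i] ^ signal[i-2], with out[0] = signal[0]^1 and out[1] = signal[1]; no register state is kept.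
import Mathlib
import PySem

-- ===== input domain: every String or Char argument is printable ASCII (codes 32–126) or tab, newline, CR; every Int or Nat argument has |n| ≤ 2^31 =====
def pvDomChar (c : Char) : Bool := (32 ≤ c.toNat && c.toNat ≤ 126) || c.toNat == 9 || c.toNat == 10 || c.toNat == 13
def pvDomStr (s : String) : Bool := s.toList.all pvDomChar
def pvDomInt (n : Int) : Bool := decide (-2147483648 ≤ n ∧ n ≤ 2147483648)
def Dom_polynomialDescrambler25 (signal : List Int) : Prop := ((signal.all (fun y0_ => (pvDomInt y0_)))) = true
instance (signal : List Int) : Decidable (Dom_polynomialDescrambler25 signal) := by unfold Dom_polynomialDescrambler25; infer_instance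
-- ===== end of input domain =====

set_option maxRecDepth 10000


-- B replaces the simulated 25-cell shift register by the fixed 2-sample delay line it implements (objective: faster, constant factor).

-- ===== PORT A =====
def arrayShiftA (array : List Int) : List Int :=
  let tmp := PySem.List.pyGetD array 0 0
  let array2 := (PySem.List.pyRange 0 ((array.length : Int) - 1) 1).foldl
      (fun acc i => PySem.List.pySetD acc i (PySem.List.pyGetD acc (i + 1) 0)) array
  PySem.List.pySetD array2 ((array2.length : Int) - 1) tmp

def polynomialDescrambler25 (signal : List Int) : List Int :=
  let r : Int := (signal.length : Int)
  let seed : List Int := [0,1,1,1,0,1,0,1,0,1,0,0,1,0,1,1,1,0,1,0,0,1,0,1,1]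
  ((PySem.List.pyRange 0 r 1).foldl (fun (st : List Int × List Int) i =>
      let xorA := PySem.Int.bxor (PySem.List.pyGetD signal i 0) (PySem.List.pyGetD st.1 24 0)
      let seed1 := arrayShiftA st.1
      let seed2 := PySem.List.pySetD seed1 0 (PySem.List.pyGetD signal i 0)
      (seed2, st.2 ++ [xorA])) (seed, ([] : List Int))).2

-- ===== PORT B =====
def polynomialDescrambler25_alt (signal : List Int) : List Int :=
  (PySem.List.enumerate signal).foldl (fun out ix =>
      if ix.1 == 0 then out ++ [PySem.Int.bxor ix.2 1]
      else if ix.1 == 1 then out ++ [ix.2]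
      else out ++ [PySem.Int.bxor ix.2 (PySem.List.pyGetD signal (ix.1 - 2) 0)]) []

-- ===== PRECONDITION & SPEC =====
def Spec_polynomialDescrambler25 (signal : List Int) (out : List Int) : Prop := out = polynomialDescrambler25_alt signal
instance (signal : List Int) (out : List Int) : Decidable (Spec_polynomialDescrambler25 signal out) := by unfold Spec_polynomialDescrambler25; infer_instance

-- ===== CLAIM (what is proved, stated in full; the proofs are below) =====
def Claim_equal_polynomialDescrambler25 : Prop := ∀ (signal : List Int), Dom_polynomialDescrambler25 signal → Spec_polynomialDescrambler25 signal (polynomialDescrambler25 signal)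

-- ===== LEMMAS AND PROOFS =====

def pvSeed0 : List Int := [0,1,1,1,0,1,0,1,0,1,0,0,1,0,1,1,1,0,1,0,0,1,0,1,1]

def pvStepA (seed : List Int) (v : Int) : List Int :=
  PySem.List.pySetD (arrayShiftA seed) 0 v

def pvSeedN (sig : List Int) : Nat → List Int
  | 0 => pvSeed0
  | n + 1 => pvStepA (pvSeedN sig n) (PySem.List.pyGetD sig (n : Int) 0)

def pvG (sig : List Int) (i : Nat) : Int :=
  if i = 0 then PySem.Int.bxor (PySem.List.pyGetD sig 0 0) 1
  else if i = 1 then PySem.List.pyGetD sig 1 0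
  else PySem.Int.bxor (PySem.List.pyGetD sig (i : Int) 0) (PySem.List.pyGetD sig ((i : Int) - 2) 0)

lemma pvFoldShiftLen (l : List Int) : ∀ (a : List Int),
    ((l.foldl (fun acc i => PySem.List.pySetD acc i (PySem.List.pyGetD acc (i + 1) 0)) a)).length = a.length := by
  induction l with
  | nil => intro a; rfl
  | cons x xs ih => intro a; simp [List.foldl, ih, PySem.List.length_pySetD]

lemma pvArrayShiftALen (a : List Int) : (arrayShiftA a).length = a.length := by
  simp [arrayShiftA, PySem.List.length_pySetD, pvFoldShiftLen]

lemma pvStepALen (a : List Int) (v : Int) : (pvStepA a v).length = a.length := by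
  simp [pvStepA, PySem.List.length_pySetD, pvArrayShiftALen]

lemma pvSeedNLen (sig : List Int) (n : Nat) : (pvSeedN sig n).length = 25 := by
  induction n with
  | zero => rfl
  | succ k ih => simp [pvSeedN, pvStepALen, ih]

lemma pvStepAGet0 (a : List Int) (v : Int) (h : a.length = 25) :
    PySem.List.pyGetD (pvStepA a v) 0 0 = v := by
  have hl : (arrayShiftA a).length = 25 := by rw [pvArrayShiftALen, h]
  rw [pvStepA, PySem.List.pySetD_of_nonneg _ _ (le_refl 0), PySem.List.pyGetD_zero]
  simp [List.getD, hl]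

lemma pvStepAGet24 (a : List Int) (v : Int) (h : a.length = 25) :
    PySem.List.pyGetD (pvStepA a v) 24 0 = PySem.List.pyGetD a 0 0 := by
  have hinner : ((PySem.List.pyRange 0 ((a.length : Int) - 1) 1).foldl
      (fun acc i => PySem.List.pySetD acc i (PySem.List.pyGetD acc (i + 1) 0)) a).length = 25 := by
    rw [pvFoldShiftLen, h]
  set inner := (PySem.List.pyRange 0 ((a.length : Int) - 1) 1).foldl
      (fun acc i => PySem.List.pySetD acc i (PySem.List.pyGetD acc (i + 1) 0)) a with hI
  have hAS : arrayShiftA a = inner.set 24 (a.getD 0 0) := by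
    rw [arrayShiftA]
    show PySem.List.pySetD inner ((inner.length : Int) - 1) (PySem.List.pyGetD a 0 0) = _
    rw [hinner, PySem.List.pyGetD_zero, PySem.List.pySetD_of_nonneg _ _ (by norm_num)]
    simp
  have h24 : ((24 : Int)) = ((24 : Nat) : Int) := by norm_num
  rw [pvStepA, hAS, PySem.List.pySetD_of_nonneg _ _ (le_refl 0), h24,
      PySem.List.pyGetD_natCast, PySem.List.pyGetD_zero]
  simp [List.getD, hinner]

lemma pvSeed24 (sig : List Int) : ∀ n : Nat,
    PySem.List.pyGetD (pvSeedN sig n) 24 0 =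
      (if n = 0 then 1 else if n = 1 then 0 else PySem.List.pyGetD sig ((n : Int) - 2) 0) := by
  intro n
  match n with
  | 0 => rfl
  | 1 =>
    norm_num
    show PySem.List.pyGetD (pvStepA pvSeed0 _) 24 0 = 0
    rw [pvStepAGet24 _ _ (by decide)]
    rfl
  | (j + 2) =>
    rw [if_neg (by omega), if_neg (by omega)]
    show PySem.List.pyGetD (pvStepA (pvSeedN sig (j + 1)) _) 24 0 = _
    rw [pvStepAGet24 _ _ (pvSeedNLen sig (j + 1))]
    show PySem.List.pyGetD (pvStepA (pvSeedN sig j) (PySem.List.pyGetD sig (j : Int) 0)) 0 0 = _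
    rw [pvStepAGet0 _ _ (pvSeedNLen sig j)]
    congr 1
    push_cast
    ring

lemma pvMain (sig : List Int) : ∀ n : Nat,
    ((PySem.List.pyRange 0 (n : Int) 1).foldl (fun (st : List Int × List Int) i =>
        let xorA := PySem.Int.bxor (PySem.List.pyGetD sig i 0) (PySem.List.pyGetD st.1 24 0)
        let seed1 := arrayShiftA st.1
        let seed2 := PySem.List.pySetD seed1 0 (PySem.List.pyGetD sig i 0)
        (seed2, st.2 ++ [xorA])) (pvSeed0, ([] : List Int)))
    = (pvSeedN sig n, (List.range n).map (pvG sig)) := by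
  intro n
  induction n with
  | zero => simp [PySem.List.pyRange_one_eq_nil (by omega : (0:Int) ≤ 0), pvSeedN]
  | succ k ih =>
    have hsplit : PySem.List.pyRange 0 ((k + 1 : Nat) : Int) 1
        = PySem.List.pyRange 0 (k : Int) 1 ++ [(k : Int)] := by
      push_cast
      exact PySem.List.pyRange_one_succ_right (by positivity)
    rw [hsplit, List.foldl_append, ih]
    simp only [List.foldl_cons, List.foldl_nil]
    show (pvStepA (pvSeedN sig k) (PySem.List.pyGetD sig (k : Int) 0),
          (List.range k).map (pvG sig) ++
            [PySem.Int.bxor (PySem.List.pyGetD sig (k : Int) 0)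
              (PySem.List.pyGetD (pvSeedN sig k) 24 0)])
        = (pvSeedN sig (k + 1), (List.range (k + 1)).map (pvG sig))
    rw [List.range_succ, List.map_append, pvSeed24]
    refine Prod.ext rfl ?_
    show _ ++ _ = _ ++ [pvG sig k]
    congr 1
    by_cases h0 : k = 0
    · subst h0; simp [pvG]
    · by_cases h1 : k = 1
      · subst h1; simp [pvG, PySem.Int.bxor_zero]
      · rw [if_neg h0, if_neg h1]
        simp [pvG, h0, h1]

lemma pvAltEq (sig : List Int) :
    polynomialDescrambler25_alt sig = (List.range sig.length).map (pvG sig) := by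
  unfold polynomialDescrambler25_alt
  rw [PySem.List.enumerate_eq_map_pyRange sig 0, PySem.List.pyRange_one]
  simp only [List.foldl_map, PySem.List.len, Int.sub_zero, Int.toNat_natCast, zero_add]
  have key : ∀ n : Nat, List.foldl
      (fun (out : List Int) (k : Nat) =>
        let ix : Int × Int := ((k : Int), PySem.List.pyGetD sig (k : Int) 0)
        if ix.1 == 0 then out ++ [PySem.Int.bxor ix.2 1]
        else if ix.1 == 1 then out ++ [ix.2]
        else out ++ [PySem.Int.bxor ix.2 (PySem.List.pyGetD sig (ix.1 - 2) 0)])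
      [] (List.range n) = (List.range n).map (pvG sig) := by
    intro n
    induction n with
    | zero => rfl
    | succ k ih =>
      rw [List.range_succ, List.foldl_append, ih, List.map_append]
      simp only [List.foldl_cons, List.foldl_nil, List.map]
      by_cases h0 : k = 0
      · subst h0; simp [pvG]
      · by_cases h1 : k = 1
        · subst h1; simp [pvG]
        · have c0 : (((k : Nat) : Int) == 0) = false := by
            rw [beq_eq_false_iff_ne]
            intro hc; exact h0 (by exact_mod_cast hc)
          have c1 : (((k : Nat) : Int) == 1) = false := by
            rw [beq_eq_false_iff_ne]
            intro hc; exact h1 (by exact_mod_cast hc)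
          simp only [c0, c1, Bool.false_eq_true, if_false]
          simp [pvG, h0, h1]
  exact key sig.length

-- ===== VERDICT (by name: the statement is the Claim_ definition above) =====
theorem polynomialDescrambler25_spec : Claim_equal_polynomialDescrambler25 := by
  intro sig _
  unfold Spec_polynomialDescrambler25
  rw [pvAltEq]
  show ((PySem.List.pyRange 0 (sig.length : Int) 1).foldl _ (pvSeed0, ([] : List Int))).2 = _
  rw [pvMain]
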